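-- pv_equiv track=rewrite | github.com/martinezpl/AOC_2020 | day15/d15p1.py | elveGame
-- ===== SOURCE A (Python) =====
-- def elveGame(l, last):
--     cn = last # considered number
--     while len(l) < 2020:
--         if cn in l:
--             i = len(l)
--             while i > 0:
--                 i -= 1
--                 if l[i] == cn:
--                     break
--             a = i + 1
--             l.append(cn)
--             cn = len(l) - a
--         else:
--             l.append(cn)
--             cn = 0
--     return l
-- ===== SOURCE B (Python) =====
-- def elveGame(l, last):
--     # Van Eck memory game with direct addressing: every number spoken during
--     # play is a gap < 2020, so a flat 2020-slot table (value -> last turn + 1,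
--     # 0 = unseen) answers the "when was it last said" query in O(1); a side
--     # dict covers out-of-range seed values.  The extension is built as its own
--     # list and concatenated, instead of A's in-place append with a backward
--     # rescan of the whole list every turn.
--     if len(l) >= 2020:
--         return l  # already complete; nothing to play
--     small = [0] * 2020
--     big = {}
--     for i, v in enumerate(l):
--         if 0 <= v < 2020:
--             small[v] = i + 1
--         else:
--             big[v] = i + 1
--     tail = []
--     cn = last
--     for n in range(len(l), 2020):
--         if 0 <= cn < 2020:
--             t = small[cn]
--             small[cn] = n + 1
--         else:
--             t = big.get(cn, 0)
--             big[cn] = n + 1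
--         tail.append(cn)
--         cn = 0 if t == 0 else n - (t - 1)
--     return l + tail
-- ===== Notes on version B (the rewrite author's own statement) =====
-- stated objective: alternative
-- what changed: B replaces A's per-turn membership test and backward rescan of the growing list with O(1) direct addressing: a flat 2020-slot last-turn table for the in-range numbers (every number spoken during play is a gap < 2020) plus a side dict for out-of-range seed values, building the extension as a separate list concatenated onto l (with an early return when the list is already complete).
import Mathlib
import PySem

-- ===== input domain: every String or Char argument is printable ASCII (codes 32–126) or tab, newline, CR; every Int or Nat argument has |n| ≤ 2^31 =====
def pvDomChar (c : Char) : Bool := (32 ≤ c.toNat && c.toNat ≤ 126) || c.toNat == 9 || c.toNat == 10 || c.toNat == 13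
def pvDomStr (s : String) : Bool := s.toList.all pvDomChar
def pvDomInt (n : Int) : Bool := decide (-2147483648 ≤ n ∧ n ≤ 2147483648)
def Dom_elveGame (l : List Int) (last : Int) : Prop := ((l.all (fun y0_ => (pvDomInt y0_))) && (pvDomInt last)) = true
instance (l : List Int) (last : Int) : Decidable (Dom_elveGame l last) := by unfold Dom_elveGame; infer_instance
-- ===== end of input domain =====

-- B answers "when was this number last said" by direct addressing into a flat
-- 2020-slot table (plus a side dict for out-of-range seed values) and builds the
-- extension as a separate list, instead of A's per-turn membership test and
-- backward rescan of the in-place-grown list.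
-- A mutates l in place (appends); the equivalence proved here is about the return value.

-- ===== PORT A =====
-- inner while loop of A: i starts at n, decrements, stops at the first i with l[i] == cn
-- (or at 0 if none); l[i] is Python indexing via PySem.List.pyGet?.
def pvScanA (l : List Int) (cn : Int) : Nat → Nat
  | 0 => 0
  | Nat.succ i => if PySem.List.pyGet? l (i : Int) = some cn then i else pvScanA l cn i

def elveGameLoopA (l : List Int) (cn : Int) : List Int :=
  if l.length < 2020 then
    if cn ∈ l then
      let i := pvScanA l cn l.length
      let a := i + 1
      let l2 := l ++ [cn]
      elveGameLoopA l2 ((l2.length : Int) - (a : Int))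
    else
      elveGameLoopA (l ++ [cn]) 0
  else l
termination_by 2020 - l.length
decreasing_by all_goals simp [List.length_append]; omega

def elveGame (l : List Int) (last : Int) : List Int := elveGameLoopA l last

-- ===== PORT B =====
-- small = [0]*2020; big = {}; for i, v in enumerate(l): …  (value -> last turn + 1, 0 = unseen)
def pvInitB (l : List Int) : List Int × PySem.Dict Int Int :=
  (PySem.List.enumerate l).foldl
    (fun sb p =>
      if 0 ≤ p.2 ∧ p.2 < 2020 then (sb.1.set p.2.toNat (p.1 + 1), sb.2)
      else (sb.1, sb.2.insert p.2 (p.1 + 1)))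
    (List.replicate 2020 0, PySem.Dict.empty)

-- for n in range(len(l), 2020): … building tail; list reads/writes are guarded
-- in-range (0 ≤ cn < 2020, table length 2020), so List.getD/List.set are exact.
def elveGameLoopB (n : Nat) (small : List Int) (big : PySem.Dict Int Int) (cn : Int) (tl : List Int) : List Int :=
  if n < 2020 then
    if 0 ≤ cn ∧ cn < 2020 then
      let t := small.getD cn.toNat 0
      elveGameLoopB (n + 1) (small.set cn.toNat ((n : Int) + 1)) big
        (if t = 0 then 0 else (n : Int) - (t - 1)) (tl ++ [cn])
    else
      let t := big.getD cn 0
      elveGameLoopB (n + 1) small (big.insert cn ((n : Int) + 1))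
        (if t = 0 then 0 else (n : Int) - (t - 1)) (tl ++ [cn])
  else tl
termination_by 2020 - n

def elveGame_alt (l : List Int) (last : Int) : List Int :=
  if 2020 ≤ l.length then l
  else
    let sb := pvInitB l
    l ++ elveGameLoopB l.length sb.1 sb.2 last []

-- ===== PRECONDITION & SPEC =====
def Spec_elveGame (l : List Int) (last : Int) (out : List Int) : Prop := out = elveGame_alt l last
instance (l : List Int) (last : Int) (out : List Int) : Decidable (Spec_elveGame l last out) := by unfold Spec_elveGame; infer_instance

-- ===== CLAIM (what is proved, stated in full; the proofs are below) =====
def Claim_equal_elveGame : Prop := ∀ (l : List Int) (last : Int), Dom_elveGame l last → Spec_elveGame l last (elveGame l last)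

-- ===== LEMMAS AND PROOFS =====

-- combined lookup of B's two containers
def pvLook (sb : List Int × PySem.Dict Int Int) (v : Int) : Int :=
  if 0 ≤ v ∧ v < 2020 then sb.1.getD v.toNat 0 else sb.2.getD v 0

theorem pvInitB_append (l : List Int) (x : Int) :
    pvInitB (l ++ [x]) =
      (if 0 ≤ x ∧ x < 2020
        then ((pvInitB l).1.set x.toNat ((l.length : Int) + 1), (pvInitB l).2)
        else ((pvInitB l).1, (pvInitB l).2.insert x ((l.length : Int) + 1))) := by
  unfold pvInitB
  rw [PySem.List.enumerate_append, List.foldl_append, PySem.List.enumerate_cons,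
    PySem.List.enumerate_nil]
  simp only [List.foldl_cons, List.foldl_nil, zero_add]

theorem pvInitB_nil : pvInitB [] = (List.replicate 2020 0, PySem.Dict.empty) := by
  unfold pvInitB
  rw [PySem.List.enumerate_nil]
  rfl

theorem pvInitB_length (l : List Int) : (pvInitB l).1.length = 2020 := by
  induction l using List.reverseRecOn with
  | nil => rw [pvInitB_nil]; exact List.length_replicate
  | append_singleton xs x ih =>
      rw [pvInitB_append]
      split
      · simp only [List.length_set]; exact ih
      · exact ih

-- the inner scan never looks at indices ≥ i, so appending past i does not change it
theorem pvScanA_append (l : List Int) (x cn : Int) :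
    ∀ i, i ≤ l.length → pvScanA (l ++ [x]) cn i = pvScanA l cn i := by
  intro i
  induction i with
  | zero => intro _; rfl
  | succ i ih =>
      intro h
      simp only [pvScanA]
      rw [PySem.List.pyGet?_natCast, PySem.List.pyGet?_natCast,
        List.getElem?_append_left (by omega)]
      split
      · rfl
      · exact ih (by omega)

theorem pvScanA_snoc_self (l : List Int) (x : Int) :
    pvScanA (l ++ [x]) x (l.length + 1) = l.length := by
  simp only [pvScanA]
  rw [PySem.List.pyGet?_natCast, List.getElem?_append_right (by omega)]
  simp

theorem pvScanA_snoc_ne (l : List Int) (x v : Int) (h : v ≠ x) :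
    pvScanA (l ++ [x]) v (l.length + 1) = pvScanA l v l.length := by
  simp only [pvScanA]
  rw [PySem.List.pyGet?_natCast, List.getElem?_append_right (by omega)]
  simp only [Nat.sub_self, List.getElem?_singleton]
  rw [if_neg (by simp; exact fun hx => h hx.symm)]
  exact pvScanA_append l x v l.length le_rfl

-- shorthand for the right-hand side of the lookup characterisation
def pvRHS (l : List Int) (v : Int) : Int :=
  if v ∈ l then ((pvScanA l v l.length : Nat) : Int) + 1 else 0

theorem pvRHS_snoc_ne (xs : List Int) (x v : Int) (h : v ≠ x) :
    pvRHS (xs ++ [x]) v = pvRHS xs v := by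
  unfold pvRHS
  have hmem : (v ∈ xs ++ [x]) ↔ v ∈ xs := by simp [h]
  by_cases hv : v ∈ xs
  · rw [if_pos (hmem.mpr hv), if_pos hv]
    have hlen : (xs ++ [x]).length = xs.length + 1 := by simp
    rw [hlen, pvScanA_snoc_ne xs x v h]
  · rw [if_neg (fun hh => hv (hmem.mp hh)), if_neg hv]

theorem pvRHS_snoc_self (xs : List Int) (x : Int) :
    pvRHS (xs ++ [x]) x = (xs.length : Int) + 1 := by
  unfold pvRHS
  rw [if_pos (by simp)]
  have hlen : (xs ++ [x]).length = xs.length + 1 := by simp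
  rw [hlen, pvScanA_snoc_self]

-- characterisation: B's lookup answers exactly A's backward scan (+1; 0 = absent)
theorem pvLook_pvInitB (l : List Int) (v : Int) :
    pvLook (pvInitB l) v = pvRHS l v := by
  by_cases hr : 0 ≤ v ∧ v < 2020
  · -- small-table side
    have main : ∀ m : List Int, (pvInitB m).1.getD v.toNat 0 = pvRHS m v := by
      intro m
      induction m using List.reverseRecOn with
      | nil =>
          rw [pvInitB_nil, pvRHS, if_neg (by simp : ¬ v ∈ ([] : List Int))]
          rw [List.getD_eq_getElem?_getD, List.getElem?_replicate]
          split <;> rfl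
      | append_singleton xs x ih =>
          rw [pvInitB_append]
          by_cases hxr : 0 ≤ x ∧ x < 2020
          · rw [if_pos hxr]
            by_cases hvx : v = x
            · subst hvx
              simp only []
              rw [List.getD_eq_getElem?_getD,
                List.getElem?_set_self (by rw [pvInitB_length]; omega),
                pvRHS_snoc_self]
              rfl
            · have hne : x.toNat ≠ v.toNat := by omega
              simp only []
              rw [List.getD_eq_getElem?_getD, List.getElem?_set_ne hne,
                ← List.getD_eq_getElem?_getD, ih, pvRHS_snoc_ne xs x v hvx]
          · rw [if_neg hxr]
            have hvx : v ≠ x := by omega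
            simp only []
            rw [ih, pvRHS_snoc_ne xs x v hvx]
    rw [pvLook, if_pos hr]
    exact main l
  · -- dict side
    have main : ∀ m : List Int, (pvInitB m).2.getD v 0 = pvRHS m v := by
      intro m
      induction m using List.reverseRecOn with
      | nil =>
          rw [pvInitB_nil, pvRHS, if_neg (by simp : ¬ v ∈ ([] : List Int))]
          exact PySem.Dict.getD_empty v 0
      | append_singleton xs x ih =>
          rw [pvInitB_append]
          by_cases hxr : 0 ≤ x ∧ x < 2020
          · rw [if_pos hxr]
            have hvx : v ≠ x := by omega
            simp only []
            rw [ih, pvRHS_snoc_ne xs x v hvx]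
          · rw [if_neg hxr]
            by_cases hvx : v = x
            · subst hvx
              simp only []
              rw [PySem.Dict.getD_insert, if_pos rfl, pvRHS_snoc_self]
            · simp only []
              rw [PySem.Dict.getD_insert, if_neg hvx, ih, pvRHS_snoc_ne xs x v hvx]
    rw [pvLook, if_neg hr]
    exact main l

theorem loopEq (l0 tl : List Int) (cn : Int) :
    elveGameLoopA (l0 ++ tl) cn =
      l0 ++ elveGameLoopB (l0 ++ tl).length (pvInitB (l0 ++ tl)).1 (pvInitB (l0 ++ tl)).2 cn tl := by
  rw [elveGameLoopA, elveGameLoopB]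
  by_cases h : (l0 ++ tl).length < 2020
  · rw [if_pos h, if_pos h]
    have hlook := pvLook_pvInitB (l0 ++ tl) cn
    unfold pvRHS at hlook
    by_cases hm : cn ∈ l0 ++ tl
    · rw [if_pos hm]
      rw [if_pos hm] at hlook
      have hA :
          ((((l0 ++ tl) ++ [cn]).length : Int) - ((pvScanA (l0 ++ tl) cn (l0 ++ tl).length + 1 : Nat) : Int))
            = (((l0 ++ tl).length : Int)) - ((pvScanA (l0 ++ tl) cn (l0 ++ tl).length : Nat) : Int) := by
        push_cast [List.length_append, List.length_singleton]
        omega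
      have key : ∀ cnB : Int,
          cnB = (((l0 ++ tl).length : Int)) - ((pvScanA (l0 ++ tl) cn (l0 ++ tl).length : Nat) : Int) →
          elveGameLoopA ((l0 ++ tl) ++ [cn]) ((((l0 ++ tl) ++ [cn]).length : Int) - ((pvScanA (l0 ++ tl) cn (l0 ++ tl).length + 1 : Nat) : Int))
            = l0 ++ elveGameLoopB ((l0 ++ tl).length + 1) (pvInitB ((l0 ++ tl) ++ [cn])).1 (pvInitB ((l0 ++ tl) ++ [cn])).2 cnB (tl ++ [cn]) := by
        intro cnB hcnB
        rw [hA, ← hcnB]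
        have := loopEq l0 (tl ++ [cn]) cnB
        rw [← List.append_assoc] at this
        rw [this]
        have hlen : (l0 ++ tl ++ [cn]).length = (l0 ++ tl).length + 1 := by
          simp only [List.length_append, List.length_cons, List.length_nil]
        rw [hlen]
      unfold pvLook at hlook
      split
      · rename_i hr
        rw [if_pos hr] at hlook
        simp only []
        rw [hlook]
        rw [if_neg (by
          have : (0:Int) ≤ ((pvScanA (l0 ++ tl) cn (l0 ++ tl).length : Nat) : Int) := Int.natCast_nonneg _
          omega)]
        rw [show (pvInitB (l0 ++ tl)).1.set cn.toNat (((l0 ++ tl).length : Int) + 1)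
              = (pvInitB ((l0 ++ tl) ++ [cn])).1 by rw [pvInitB_append, if_pos hr]]
        rw [show (pvInitB (l0 ++ tl)).2 = (pvInitB ((l0 ++ tl) ++ [cn])).2 by rw [pvInitB_append, if_pos hr]]
        exact key _ (by omega)
      · rename_i hr
        rw [if_neg hr] at hlook
        simp only []
        rw [hlook]
        rw [if_neg (by
          have : (0:Int) ≤ ((pvScanA (l0 ++ tl) cn (l0 ++ tl).length : Nat) : Int) := Int.natCast_nonneg _
          omega)]
        rw [show (pvInitB (l0 ++ tl)).1 = (pvInitB ((l0 ++ tl) ++ [cn])).1 by rw [pvInitB_append, if_neg hr]]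
        rw [show (pvInitB (l0 ++ tl)).2.insert cn (((l0 ++ tl).length : Int) + 1)
              = (pvInitB ((l0 ++ tl) ++ [cn])).2 by rw [pvInitB_append, if_neg hr]]
        exact key _ (by omega)
    · rw [if_neg hm]
      rw [if_neg hm] at hlook
      have key :
          elveGameLoopA ((l0 ++ tl) ++ [cn]) 0
            = l0 ++ elveGameLoopB ((l0 ++ tl).length + 1) (pvInitB ((l0 ++ tl) ++ [cn])).1 (pvInitB ((l0 ++ tl) ++ [cn])).2 0 (tl ++ [cn]) := by
        have := loopEq l0 (tl ++ [cn]) 0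
        rw [← List.append_assoc] at this
        rw [this]
        have hlen : (l0 ++ tl ++ [cn]).length = (l0 ++ tl).length + 1 := by
          simp only [List.length_append, List.length_cons, List.length_nil]
        rw [hlen]
      unfold pvLook at hlook
      split
      · rename_i hr
        rw [if_pos hr] at hlook
        simp only []
        rw [hlook, if_pos rfl]
        rw [show (pvInitB (l0 ++ tl)).1.set cn.toNat (((l0 ++ tl).length : Int) + 1)
              = (pvInitB ((l0 ++ tl) ++ [cn])).1 by rw [pvInitB_append, if_pos hr]]
        rw [show (pvInitB (l0 ++ tl)).2 = (pvInitB ((l0 ++ tl) ++ [cn])).2 by rw [pvInitB_append, if_pos hr]]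
        exact key
      · rename_i hr
        rw [if_neg hr] at hlook
        simp only []
        rw [hlook, if_pos rfl]
        rw [show (pvInitB (l0 ++ tl)).1 = (pvInitB ((l0 ++ tl) ++ [cn])).1 by rw [pvInitB_append, if_neg hr]]
        rw [show (pvInitB (l0 ++ tl)).2.insert cn (((l0 ++ tl).length : Int) + 1)
              = (pvInitB ((l0 ++ tl) ++ [cn])).2 by rw [pvInitB_append, if_neg hr]]
        exact key
  · rw [if_neg h, if_neg h]
termination_by 2020 - (l0 ++ tl).length
decreasing_by all_goals (simp only [List.length_append, List.length_cons, List.length_nil] at h ⊢; omega)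

-- ===== VERDICT (by name: the statement is the Claim_ definition above) =====
theorem elveGame_spec : Claim_equal_elveGame := by
  intro l last _
  unfold Spec_elveGame elveGame elveGame_alt
  by_cases h : 2020 ≤ l.length
  · rw [if_pos h, elveGameLoopA, if_neg (by omega)]
  · rw [if_neg h]
    have := loopEq l [] last
    simpa using this
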